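-- pv_equiv track=rewrite | github.com/sueszli/vector-database-benchmark | dataset/python-mutated/SantiALS.py | abaco
-- ===== SOURCE A (Python) =====
-- def abaco(cadena: list) -> str:
--     if False:
--         i = 10
--         return i + 15
--     millon = ''
--     miles = ''
--     cientos = ''
--     separador = 1
--     for fila in cadena:
--         if separador == 1:
--             millon += str(fila.index('-'))
--             separador += 1
--         elif separador > 1 and separador <= 4:
--             miles += str(fila.index('-'))
--             separador += 1
--         else:
--             cientos += str(fila.index('-'))
--     return (millon, miles, cientos)
-- ===== SOURCE B (Python) =====
-- def abaco(cadena: list) -> str: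
--     # Positional partitioning: all dash positions in one pass, then slices
--     # instead of A's stateful separador counter.
--     vals = [str(fila.index('-')) for fila in cadena]
--     return (''.join(vals[:1]), ''.join(vals[1:4]), ''.join(vals[4:]))
-- ===== Notes on version B (the rewrite author's own statement) =====
-- stated objective: simpler
-- what changed: Replaces the separador state machine (a counter threaded through the loop deciding which of three accumulators each row's dash position is appended to) with a single comprehension computing every dash position followed by positional slicing into the three buckets.
import Mathlib
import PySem

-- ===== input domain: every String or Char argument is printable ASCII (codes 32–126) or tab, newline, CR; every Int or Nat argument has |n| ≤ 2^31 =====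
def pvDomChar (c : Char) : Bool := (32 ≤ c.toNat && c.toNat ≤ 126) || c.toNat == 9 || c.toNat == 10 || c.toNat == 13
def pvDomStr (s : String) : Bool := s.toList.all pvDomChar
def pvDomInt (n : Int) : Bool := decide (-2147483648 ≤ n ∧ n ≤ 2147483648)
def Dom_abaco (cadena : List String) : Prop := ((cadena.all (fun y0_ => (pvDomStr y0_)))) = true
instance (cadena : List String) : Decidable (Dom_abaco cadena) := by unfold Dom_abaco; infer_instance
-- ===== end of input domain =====

-- B replaces A's stateful separador counter with one pass computing all dash
-- positions followed by positional slicing into the three buckets (objective: simpler).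


-- ===== PORT A =====
-- str(fila.index('-')) as a List Char (strings are handled as code-point lists, per PySem).
-- Python's str.index raises ValueError when '-' is absent; PySem.Str.find returns -1 there,
-- and Pre_abaco excludes exactly those inputs, so on Pre_ this is exact.
def pvDash (fila : String) : List Char := PySem.Int.toChars (PySem.Str.find fila "-")

def abacoLoop : List String → List Char → List Char → List Char → Int → String × String × String
  | [], millon, miles, cientos, _ => (String.ofList millon, String.ofList miles, String.ofList cientos)
  | fila :: rest, millon, miles, cientos, separador =>
    if separador = 1 then
      abacoLoop rest (millon ++ pvDash fila) miles cientos (separador + 1)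
    else if separador > 1 ∧ separador ≤ 4 then
      abacoLoop rest millon (miles ++ pvDash fila) cientos (separador + 1)
    else
      abacoLoop rest millon miles (cientos ++ pvDash fila) separador

def abaco (cadena : List String) : String × String × String :=
  abacoLoop cadena [] [] [] 1

-- ===== PORT B =====
-- vals = [str(f.index('-')) for f in cadena]; ''.join over the slices [:1], [1:4], [4:]
def abaco_alt (cadena : List String) : String × String × String :=
  let vals := cadena.map pvDash
  (String.ofList (PySem.Chars.join [] (PySem.List.slice vals none (some 1))),
   String.ofList (PySem.Chars.join [] (PySem.List.slice vals (some 1) (some 4))),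
   String.ofList (PySem.Chars.join [] (PySem.List.slice vals (some 4) none)))

-- ===== PRECONDITION & SPEC =====
-- Pre_ excludes exactly the inputs where some row has no '-': there Python's
-- fila.index('-') raises ValueError, so A returns nothing.
def Pre_abaco (cadena : List String) : Prop :=
  ∀ fila ∈ cadena, PySem.Str.isIn "-" fila = true
instance (cadena : List String) : Decidable (Pre_abaco cadena) := by unfold Pre_abaco; infer_instance

def pvWitness_abaco : List String := ["ooo-o", "-", "oo-"]

def Spec_abaco (cadena : List String) (out : String × String × String) : Prop := out = abaco_alt cadena
instance (cadena : List String) (out : String × String × String) : Decidable (Spec_abaco cadena out) := by unfold Spec_abaco; infer_instance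

-- ===== CLAIM (what is proved, stated in full; the proofs are below) =====
def Claim_equal_abaco : Prop := ∀ (cadena : List String), Dom_abaco cadena → Pre_abaco cadena → Spec_abaco cadena (abaco cadena)

-- ===== LEMMAS AND PROOFS =====

-- ''.join is concatenation
theorem join_empty_sep (xs : List (List Char)) : PySem.Chars.join [] xs = xs.flatten := by
  induction xs with
  | nil => simp [PySem.Chars.join_nil]
  | cons p rest ih =>
    cases rest with
    | nil => simp [PySem.Chars.join_singleton]
    | cons q t => simp [PySem.Chars.join_cons_cons, ih]

theorem slice_to_one (xs : List (List Char)) :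
    PySem.List.slice xs none (some 1) = xs.take 1 := by
  rw [PySem.List.slice_to xs (by norm_num)]; norm_num

theorem slice_one_four (xs : List (List Char)) :
    PySem.List.slice xs (some 1) (some 4) = (xs.drop 1).take 3 := by
  rw [PySem.List.slice_toNat xs (by norm_num) (by norm_num)]; rfl

theorem slice_from_four (xs : List (List Char)) :
    PySem.List.slice xs (some 4) none = xs.drop 4 := by
  rw [PySem.List.slice_from xs (by norm_num)]; rfl

-- once separador reaches 5 it never changes and every row goes to cientos
theorem abacoLoop_five (rest : List String) : ∀ (m mi c : List Char),
    abacoLoop rest m mi c 5 = (String.ofList m, String.ofList mi, String.ofList (c ++ (rest.map pvDash).flatten)) := by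
  induction rest with
  | nil => intro m mi c; simp [abacoLoop]
  | cons f t ih => intro m mi c; simp [abacoLoop, ih]

-- ===== VERDICT (by name: the statement is the Claim_ definition above) =====
theorem abaco_spec : Claim_equal_abaco := by
  intro cadena _ _
  unfold Spec_abaco abaco abaco_alt
  match cadena with
  | [] => simp [abacoLoop, PySem.List.slice]
  | [a] => simp [abacoLoop, slice_to_one, slice_one_four, slice_from_four]
  | [a, b] => simp [abacoLoop, slice_to_one, slice_one_four, slice_from_four]
  | [a, b, c] => simp [abacoLoop, join_empty_sep, slice_to_one, slice_one_four, slice_from_four]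
  | [a, b, c, d] => simp [abacoLoop, join_empty_sep, slice_to_one, slice_one_four, slice_from_four]
  | a :: b :: c :: d :: rest =>
      simp [abacoLoop, abacoLoop_five, join_empty_sep, slice_to_one, slice_one_four, slice_from_four]
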